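-- pv_equiv track=rewrite | github.com/ParkJaeHwanOriginal/SSAFY_february | algorithm/250319DFSBFS/calcul.py | bfs
-- ===== SOURCE A (Python) =====
-- from collections import deque
--
-- def bfs(a, b) :
--     visited = set([a])
--     cnt = 0
--     q = deque([(a, cnt)])
--     while q :
--         num, cnt = q.popleft()
--
--         num_lst = [(num + 1), (num - 1), (num * 2), (num - 10)]
--         if num > b :
--             num_lst = [(num + 1), (num - 1), (num - 10)]
--
--         cnt += 1
--         for i in num_lst :
--             if i == b :
--                 return cnt
--             if i > 1000000 or i <= 0 :
--                 continue
--             if i not in visited :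
--                 q.append((i,cnt))
--                 visited.add(i)
-- ===== SOURCE B (Python) =====
-- def bfs(a, b):
--     def nbrs(num):
--         return [num + 1, num - 1, num - 10] if num > b else [num + 1, num - 1, num * 2, num - 10]
--     visited = {a}
--     frontier = {a}
--     depth = 0
--     while frontier:
--         depth += 1
--         image = {i for num in frontier for i in nbrs(num)}
--         if b in image:
--             return depth
--         fresh = {i for i in image if 0 < i <= 1000000} - visited
--         visited |= fresh
--         frontier = fresh
-- ===== Notes on version B (the rewrite author's own statement) =====
-- stated objective: alternative
-- what changed: Replaced the node-at-a-time deque BFS (queue of (node, distance) pairs, per-neighbour early return and per-neighbour visited updates) by set-algebra BFS: each round takes the whole frontier set, builds the set image of the neighbour map, tests the target with one membership query on that image, and computes the next frontier by a range filter and set difference against the visited set.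
import Mathlib
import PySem

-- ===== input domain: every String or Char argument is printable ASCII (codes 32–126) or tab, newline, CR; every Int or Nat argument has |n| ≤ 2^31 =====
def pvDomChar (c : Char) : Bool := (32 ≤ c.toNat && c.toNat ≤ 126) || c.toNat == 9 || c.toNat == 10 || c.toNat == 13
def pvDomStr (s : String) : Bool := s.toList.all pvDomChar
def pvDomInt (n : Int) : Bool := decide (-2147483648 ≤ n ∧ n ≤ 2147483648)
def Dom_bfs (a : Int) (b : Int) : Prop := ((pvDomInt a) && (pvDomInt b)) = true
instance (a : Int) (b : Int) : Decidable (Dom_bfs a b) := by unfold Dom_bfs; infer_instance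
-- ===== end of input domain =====

-- B replaces A's node-at-a-time deque BFS (queue of (node, distance) pairs, per-neighbour
-- early return and per-neighbour visited updates) by set-algebra BFS: each round takes the
-- whole frontier set, builds the set image of the neighbour map, tests the target with one
-- membership query on that image, and computes the next frontier by a range filter and set
-- difference against the visited set; objective: alternative (no queue, no per-node
-- bookkeeping, the traversal order disappears from the algorithm).
-- Both ports keep 'visited' as a Std.HashSet Int: both Pythons only insert into it and test
-- membership (its iteration order is never consumed), so this models the Python set exactly;
-- the frontier sets of B, whose insertion order IS fixed by the Lean model, stay PySem.Set.
-- Both loops carry a fuel counter purely to make the recursion structural (A: one unit per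
-- dequeued node, B: one unit per round); 2000000 exceeds the number of nodes A can dequeue
-- and of rounds B can run (every node beyond the start lies in 1..1000000 and is visited at
-- most once), so neither ever runs out — the proofs below establish exactly that.

def bfsFuel : Nat := 2000000

-- ===== PORT A =====
-- inner 'for i in num_lst' loop of A: early return (.inl cnt) or updated (queue, visited)
def bfsInnerA (b : Int) (cnt : Int) :
    List Int → List (Int × Int) → Std.HashSet Int → Sum Int (List (Int × Int) × Std.HashSet Int)
  | [], q, v => .inr (q, v)
  | i :: rest, q, v =>
    if i = b then .inl cnt
    else if i > 1000000 ∨ i ≤ 0 then bfsInnerA b cnt rest q v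
    else if v.contains i then bfsInnerA b cnt rest q v
    else bfsInnerA b cnt rest (q ++ [(i, cnt)]) (v.insert i)

-- A's 'while q' loop
def bfsLoopA (b : Int) : Nat → List (Int × Int) → Std.HashSet Int → Option Int
  | _, [], _ => none
  | 0, _ :: _, _ => none
  | fuel + 1, (num, cnt) :: rest, v =>
    let numLst := [num + 1, num - 1, num * 2, num - 10]
    let numLst := if num > b then [num + 1, num - 1, num - 10] else numLst
    match bfsInnerA b (cnt + 1) numLst rest v with
    | .inl r => some r
    | .inr (q', v') => bfsLoopA b fuel q' v'

def bfs (a : Int) (b : Int) : Option Int :=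
  bfsLoopA b bfsFuel [(a, 0)] (Std.HashSet.ofList [a])

-- ===== PORT B =====
-- Source B's local 'nbrs'
def bfsNbrs (b : Int) (num : Int) : List Int :=
  if num > b then [num + 1, num - 1, num - 10] else [num + 1, num - 1, num * 2, num - 10]

-- Source B's 'while frontier' loop: one recursive step per round; the set comprehensions become
-- PySem.Set.ofList / filters, 'visited |= fresh' becomes a fold of inserts
def bfsLoopB (b : Int) : Nat → Int → PySem.Set Int → Std.HashSet Int → Option Int
  | _, _, [], _ => none
  | 0, _, _ :: _, _ => none
  | fuel + 1, depth, n :: fr, visited =>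
    let image := PySem.Set.ofList ((n :: fr).flatMap (bfsNbrs b))
    if PySem.Set.contains image b then some (depth + 1)
    else
      let fresh := (image.filter (fun i => decide (0 < i) && decide (i ≤ 1000000))).filter
        (fun i => !(visited.contains i))
      bfsLoopB b fuel (depth + 1) fresh (fresh.foldl (fun h x => h.insert x) visited)

def bfs_alt (a : Int) (b : Int) : Option Int :=
  bfsLoopB b bfsFuel 0 (PySem.Set.ofList [a]) (Std.HashSet.ofList [a])

-- ===== PRECONDITION & SPEC =====
def Spec_bfs (a : Int) (b : Int) (out : Option Int) : Prop := out = bfs_alt a b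
instance (a : Int) (b : Int) (out : Option Int) : Decidable (Spec_bfs a b out) := by unfold Spec_bfs; infer_instance

-- ===== CLAIM (what is proved, stated in full; the proofs are below) =====
def Claim_equal_bfs : Prop := ∀ (a : Int) (b : Int), Dom_bfs a b → Spec_bfs a b (bfs a b)

-- ===== LEMMAS AND PROOFS =====

-- the fold A's inner loop performs on (next-frontier, visited), per neighbour
def accF (nl : List Int) (s : List Int × Std.HashSet Int) : List Int × Std.HashSet Int :=
  nl.foldl
    (fun s i =>
      if 0 < i ∧ i ≤ 1000000 ∧ ¬ (s.2.contains i) then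
        (s.1 ++ [i], s.2.insert i)
      else s)
    s

-- the elements a level starting with visited v0 may still discover
def filtP (v0 : Std.HashSet Int) (s : List Int) : List Int :=
  s.filter (fun i => decide (0 < i) && decide (i ≤ 1000000) && !(v0.contains i))

-- how many in-range values are not yet visited (termination budget)
noncomputable def freshLeft (v : Std.HashSet Int) : Nat :=
  ((Finset.Icc (1 : Int) 1000000).filter (fun x => ¬ v.contains x)).card

-- If b occurs in the neighbour list, A's inner loop returns cnt.
theorem bfsInnerA_mem (b cnt : Int) (nl : List Int) (hq : b ∈ nl) :
    ∀ (q : List (Int × Int)) (v : Std.HashSet Int), bfsInnerA b cnt nl q v = .inl cnt := by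
  induction nl with
  | nil => cases hq
  | cons i t ih =>
    intro q v
    by_cases hb : i = b
    · simp [bfsInnerA, hb]
    · have ht : b ∈ t := by cases hq with
        | head => exact absurd rfl hb
        | tail _ h => exact h
      by_cases h1 : i > 1000000 ∨ i ≤ 0
      · simp [bfsInnerA, hb, h1, ih ht]
      · by_cases h2 : v.contains i
        · simp [bfsInnerA, hb, h1, ih ht]
        · simp [bfsInnerA, hb, h1, ih ht]

-- If b does not occur, A's inner loop on a queue of shape p ++ nxt-at-cnt performs accF.
theorem bfsInnerA_not_mem (b cnt : Int) (nl : List Int) (hq : b ∉ nl) :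
    ∀ (p : List (Int × Int)) (nxt : List Int) (v : Std.HashSet Int),
      bfsInnerA b cnt nl (p ++ nxt.map (fun x => (x, cnt))) v =
        .inr (p ++ ((accF nl (nxt, v)).1.map (fun x => (x, cnt))), (accF nl (nxt, v)).2) := by
  induction nl with
  | nil => intro p nxt v; simp [bfsInnerA, accF]
  | cons i t ih =>
    intro p nxt v
    have hb : i ≠ b := fun h => hq (h ▸ List.mem_cons_self)
    have ht : b ∉ t := fun h => hq (List.mem_cons_of_mem _ h)
    by_cases h1 : i > 1000000 ∨ i ≤ 0
    · have hc : ¬ (0 < i ∧ i ≤ 1000000 ∧ ¬ (v.contains i)) := by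
        rcases h1 with h | h <;> intro hcon <;> omega
      simp only [bfsInnerA, accF, List.foldl_cons, if_neg hb, if_pos h1, if_neg hc]
      exact ih ht p nxt v
    · by_cases h2 : v.contains i
      · have hc : ¬ (0 < i ∧ i ≤ 1000000 ∧ ¬ (v.contains i)) := fun hcon => hcon.2.2 h2
        simp only [bfsInnerA, accF, List.foldl_cons, if_neg hb, if_neg h1, if_pos h2,
          if_neg hc]
        exact ih ht p nxt v
      · have hc : 0 < i ∧ i ≤ 1000000 ∧ ¬ (v.contains i) := by
          refine ⟨by omega, by omega, h2⟩
        simp only [bfsInnerA, accF, List.foldl_cons, if_neg hb, if_neg h1, if_neg h2,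
          if_pos hc]
        have := ih ht p (nxt ++ [i]) (v.insert i)
        simpa [accF, List.map_append, List.append_assoc] using this

-- Running A through one whole level (frontier fr at depth d, partial next frontier p).
theorem bfsLoopA_level (b d : Int) :
    ∀ (fr p : List Int) (v : Std.HashSet Int) (f : Nat), fr.length ≤ f →
      bfsLoopA b f (fr.map (fun x => (x, d)) ++ p.map (fun x => (x, d + 1))) v =
        if b ∈ fr.flatMap (bfsNbrs b) then some (d + 1)
        else bfsLoopA b (f - fr.length)
          ((accF (fr.flatMap (bfsNbrs b)) (p, v)).1.map (fun x => (x, d + 1)))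
          (accF (fr.flatMap (bfsNbrs b)) (p, v)).2 := by
  intro fr
  induction fr with
  | nil =>
    intro p v f _
    simp [accF]
  | cons num fr ih =>
    intro p v f hf
    simp only [List.length_cons] at hf
    obtain ⟨f', rfl⟩ : ∃ f', f = f' + 1 := ⟨f - 1, by omega⟩
    have hnl : (if num > b then [num + 1, num - 1, num - 10]
        else [num + 1, num - 1, num * 2, num - 10]) = bfsNbrs b num := by
      simp [bfsNbrs]
    by_cases hb : b ∈ bfsNbrs b num
    · have hflat : b ∈ (num :: fr).flatMap (bfsNbrs b) := by
        simp only [List.flatMap_cons, List.mem_append]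
        exact Or.inl hb
      simp only [List.map_cons, List.cons_append, bfsLoopA, hnl]
      rw [bfsInnerA_mem b (d + 1) _ hb, if_pos hflat]
    · have hrun := bfsInnerA_not_mem b (d + 1) (bfsNbrs b num) hb
        (fr.map (fun x => (x, d))) p v
      simp only [List.map_cons, List.cons_append, bfsLoopA, hnl]
      rw [hrun]
      show bfsLoopA b f' (fr.map (fun x => (x, d)) ++
          (accF (bfsNbrs b num) (p, v)).1.map (fun x => (x, d + 1)))
          (accF (bfsNbrs b num) (p, v)).2 = _
      have hrec := ih (accF (bfsNbrs b num) (p, v)).1 (accF (bfsNbrs b num) (p, v)).2 f'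
        (by omega)
      simp only [Prod.mk.eta] at hrec
      rw [hrec]
      have hmem : (b ∈ (num :: fr).flatMap (bfsNbrs b)) ↔ (b ∈ fr.flatMap (bfsNbrs b)) := by
        simp [List.flatMap_cons, hb]
      have hacc : accF ((num :: fr).flatMap (bfsNbrs b)) (p, v) =
          accF (fr.flatMap (bfsNbrs b)) (accF (bfsNbrs b num) (p, v)) := by
        simp [accF, List.flatMap_cons, List.foldl_append]
      simp only [hmem, hacc, List.length_cons, Nat.succ_sub_succ]

-- membership after a fold of inserts
theorem contains_foldl_insert (l : List Int) (v : Std.HashSet Int) (x : Int) :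
    (l.foldl (fun h y => h.insert y) v).contains x = (v.contains x || l.contains x) := by
  induction l generalizing v with
  | nil => simp
  | cons i t ih =>
    simp only [List.foldl_cons, ih]
    apply Bool.eq_iff_iff.mpr
    simp only [Bool.or_eq_true, Std.HashSet.contains_insert, beq_iff_eq,
      List.contains_eq_mem, decide_eq_true_eq, List.mem_cons]
    tauto

-- A's accF over a whole level equals B's dedup-then-filter computation.
theorem accF_dedup (v0 : Std.HashSet Int) :
    ∀ (flat : List Int) (s : PySem.Set Int),
      accF flat (filtP v0 s, (filtP v0 s).foldl (fun h x => h.insert x) v0) =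
        (filtP v0 (flat.foldl PySem.Set.add s),
          (filtP v0 (flat.foldl PySem.Set.add s)).foldl (fun h x => h.insert x) v0) := by
  intro flat
  induction flat with
  | nil => intro s; simp [accF]
  | cons i flat ih =>
    intro s
    have hcur : ∀ x : Int, ((filtP v0 s).foldl (fun h x => h.insert x) v0).contains x =
        (v0.contains x || (filtP v0 s).contains x) := fun x => contains_foldl_insert _ _ _
    have hstep :
        (if 0 < i ∧ i ≤ 1000000 ∧
            ¬ (((filtP v0 s).foldl (fun h x => h.insert x) v0).contains i) then
          (filtP v0 s ++ [i], ((filtP v0 s).foldl (fun h x => h.insert x) v0).insert i)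
        else (filtP v0 s, (filtP v0 s).foldl (fun h x => h.insert x) v0)) =
        (filtP v0 (PySem.Set.add s i),
          (filtP v0 (PySem.Set.add s i)).foldl (fun h x => h.insert x) v0) := by
      by_cases hs : i ∈ s
      · have hadd : PySem.Set.add s i = s := by
          simp [PySem.Set.add, PySem.Set.contains, hs]
        rw [hadd]
        have hcond : ¬ (0 < i ∧ i ≤ 1000000 ∧
            ¬ (((filtP v0 s).foldl (fun h x => h.insert x) v0).contains i)) := by
          rintro ⟨c1, c2, c3⟩
          apply c3
          rw [hcur i]
          by_cases hv : v0.contains i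
          · simp [hv]
          · have : i ∈ filtP v0 s := by
              simp only [filtP, List.mem_filter]
              exact ⟨hs, by simp [hv, c1, c2]⟩
            simp [List.contains_eq_mem, this]
        rw [if_neg hcond]
      · have hadd : PySem.Set.add s i = s ++ [i] := by
          simp [PySem.Set.add, PySem.Set.contains, hs]
        rw [hadd]
        have hfi : i ∉ filtP v0 s := fun h => hs (List.mem_of_mem_filter h)
        have hfsplit : filtP v0 (s ++ [i]) = filtP v0 s ++ filtP v0 [i] := by
          simp [filtP]
        by_cases hc : 0 < i ∧ i ≤ 1000000 ∧ v0.contains i = false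
        · have hcond : 0 < i ∧ i ≤ 1000000 ∧
              ¬ (((filtP v0 s).foldl (fun h x => h.insert x) v0).contains i) := by
            refine ⟨hc.1, hc.2.1, ?_⟩
            rw [hcur i, hc.2.2]
            simp [List.contains_eq_mem, hfi]
          rw [if_pos hcond]
          have hone : filtP v0 [i] = [i] := by
            simp [filtP, hc.1, hc.2.1, hc.2.2]
          simp [hfsplit, hone, List.foldl_append]
        · have hone : filtP v0 [i] = [] := by
            simp only [filtP, List.filter_cons, List.filter_nil]
            by_cases c1 : 0 < i
            · by_cases c2 : i ≤ 1000000
              · have hv : v0.contains i = true := by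
                  cases h : v0.contains i
                  · exact absurd ⟨c1, c2, h⟩ hc
                  · rfl
                simp [c1, c2, hv]
              · simp [c2]
            · simp [c1]
          have hcond : ¬ (0 < i ∧ i ≤ 1000000 ∧
              ¬ (((filtP v0 s).foldl (fun h x => h.insert x) v0).contains i)) := by
            rintro ⟨c1, c2, c3⟩
            apply c3
            rw [hcur i]
            have hv : v0.contains i = true := by
              cases h : v0.contains i
              · exact absurd ⟨c1, c2, h⟩ hc
              · rfl
            simp [hv]
          rw [if_neg hcond, hfsplit, hone]
          simp
    calc accF (i :: flat) (filtP v0 s, (filtP v0 s).foldl (fun h x => h.insert x) v0)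
        = accF flat (filtP v0 (PySem.Set.add s i),
            (filtP v0 (PySem.Set.add s i)).foldl (fun h x => h.insert x) v0) := by
          simp only [accF, List.foldl_cons]
          rw [← hstep]
      _ = _ := by
          rw [ih (PySem.Set.add s i)]
          simp [List.foldl_cons]

theorem freshLeft_insert (v : Std.HashSet Int) (i : Int) (h1 : 1 ≤ i) (h2 : i ≤ 1000000)
    (h3 : v.contains i = false) : freshLeft (v.insert i) + 1 = freshLeft v := by
  unfold freshLeft
  have hmem : i ∈ (Finset.Icc (1 : Int) 1000000).filter (fun x => ¬ v.contains x) := by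
    refine Finset.mem_filter.mpr ⟨Finset.mem_Icc.mpr ⟨h1, h2⟩, ?_⟩
    simp [h3]
  have heq : (Finset.Icc (1 : Int) 1000000).filter (fun x => ¬ (v.insert i).contains x) =
      ((Finset.Icc (1 : Int) 1000000).filter (fun x => ¬ v.contains x)).erase i := by
    rw [← Finset.filter_ne' ((Finset.Icc (1 : Int) 1000000).filter
        (fun x => ¬ v.contains x)) i, Finset.filter_filter]
    apply Finset.filter_congr
    intro x _
    simp only [Std.HashSet.contains_insert]
    constructor
    · intro h
      simp only [Bool.or_eq_true, beq_iff_eq] at h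
      exact ⟨fun hc => h (Or.inr hc), fun hc => h (Or.inl hc.symm)⟩
    · intro h hc
      simp only [Bool.or_eq_true, beq_iff_eq] at hc
      rcases hc with hc | hc
      · exact h.2 hc.symm
      · exact h.1 hc
  rw [heq, Finset.card_erase_of_mem hmem]
  have := Finset.card_pos.mpr ⟨i, hmem⟩
  omega

theorem freshLeft_foldl (v : Std.HashSet Int) (fresh : List Int) (hnd : fresh.Nodup)
    (hmem : ∀ x ∈ fresh, 1 ≤ x ∧ x ≤ 1000000 ∧ v.contains x = false) :
    freshLeft (fresh.foldl (fun h x => h.insert x) v) + fresh.length = freshLeft v := by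
  induction fresh generalizing v with
  | nil => simp
  | cons i r ih =>
    obtain ⟨h1, h2, h3⟩ := hmem i List.mem_cons_self
    have step := freshLeft_insert v i h1 h2 h3
    have hrec := ih (v.insert i) (List.Nodup.of_cons hnd) ?_
    · simp only [List.foldl_cons, List.length_cons]
      omega
    · intro x hx
      obtain ⟨a1, a2, a3⟩ := hmem x (List.mem_cons_of_mem _ hx)
      refine ⟨a1, a2, ?_⟩
      have hne : i ≠ x := fun h => (List.nodup_cons.mp hnd).1 (h ▸ hx)
      simp [Std.HashSet.contains_insert, a3, hne]

theorem bfsLoopA_nil (b : Int) (f : Nat) (v : Std.HashSet Int) :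
    bfsLoopA b f [] v = none := by cases f <;> rfl

theorem bfsLoopB_nil (b : Int) (f : Nat) (d : Int) (v : Std.HashSet Int) :
    bfsLoopB b f d [] v = none := by cases f <;> rfl

-- B's fresh set is the filtP of the image
theorem fresh_eq_filtP (v : Std.HashSet Int) (image : List Int) :
    (image.filter (fun i => decide (0 < i) && decide (i ≤ 1000000))).filter
        (fun i => !(v.contains i)) = filtP v image := by
  simp only [filtP, List.filter_filter]
  apply List.filter_congr
  intro x _
  cases v.contains x <;> cases decide (0 < x) <;> cases decide (x ≤ 1000000) <;> rfl

-- Simulation: at each level boundary A's queue is the frontier tagged with its depth.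
set_option maxRecDepth 4096 in
theorem bfsLoop_sim (b : Int) :
    ∀ (n : Nat) (v : Std.HashSet Int) (fr : List Int) (d : Int) (f₁ f₂ : Nat),
      freshLeft v ≤ n → freshLeft v + fr.length ≤ f₁ → freshLeft v + 1 ≤ f₂ →
      bfsLoopA b f₁ (fr.map (fun x => (x, d))) v = bfsLoopB b f₂ d fr v := by
  intro n
  induction n using Nat.strong_induction_on with
  | _ n ih =>
    intro v fr d f₁ f₂ hn h1 h2
    cases fr with
    | nil => simp [bfsLoopA_nil, bfsLoopB_nil]
    | cons num fr' =>
      obtain ⟨g₂, rfl⟩ : ∃ g, f₂ = g + 1 := ⟨f₂ - 1, by omega⟩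
      have hlen : (num :: fr').length ≤ f₁ := by
        simp only [List.length_cons] at h1 ⊢; omega
      have hA := bfsLoopA_level b d (num :: fr') [] v f₁ hlen
      simp only [List.map_nil, List.append_nil] at hA
      have hacc : accF ((num :: fr').flatMap (bfsNbrs b)) ([], v) =
          (filtP v (PySem.Set.ofList ((num :: fr').flatMap (bfsNbrs b))),
            (filtP v (PySem.Set.ofList ((num :: fr').flatMap (bfsNbrs b)))).foldl
              (fun h x => h.insert x) v) := by
        have := accF_dedup v ((num :: fr').flatMap (bfsNbrs b)) ([] : PySem.Set Int)
        simpa [filtP, PySem.Set.ofList, PySem.Set.empty, List.foldl_append] using this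
      set image := PySem.Set.ofList ((num :: fr').flatMap (bfsNbrs b)) with himage
      set fresh := filtP v image with hfresh
      have hnd : fresh.Nodup := by
        rw [hfresh, filtP]
        exact List.Nodup.filter _ (PySem.Set.nodup_ofList _)
      have hmemf : ∀ x ∈ fresh, 1 ≤ x ∧ x ≤ 1000000 ∧ v.contains x = false := by
        intro x hx
        rw [hfresh, filtP] at hx
        have h := List.of_mem_filter hx
        simp only [Bool.and_eq_true, decide_eq_true_eq, Bool.not_eq_true'] at h
        exact ⟨by omega, h.1.2, h.2⟩
      have hfl := freshLeft_foldl v fresh hnd hmemf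
      have hcont : PySem.Set.contains image b =
          decide (b ∈ (num :: fr').flatMap (bfsNbrs b)) := by
        by_cases hbm : b ∈ (num :: fr').flatMap (bfsNbrs b)
        · simp [PySem.Set.mem_ofList, himage]
        · simp [PySem.Set.mem_ofList, himage]
      by_cases hb : b ∈ (num :: fr').flatMap (bfsNbrs b)
      · rw [hA, if_pos hb]
        simp only [bfsLoopB, ← himage, hcont, hb, decide_true, if_true]
      · rw [hA, if_neg hb, hacc]
        simp only [bfsLoopB, ← himage, hcont, hb, decide_false, Bool.false_eq_true, if_false,
          fresh_eq_filtP, ← hfresh]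
        by_cases hfr : fresh = []
        · rw [hfr]; simp only [List.map_nil, List.foldl_nil, bfsLoopA_nil, bfsLoopB_nil]
        · have hlenf : 1 ≤ fresh.length := by
            cases hq : fresh with
            | nil => exact absurd hq hfr
            | cons y ys => simp
          refine ih (freshLeft (fresh.foldl (fun h x => h.insert x) v)) (by omega)
            (fresh.foldl (fun h x => h.insert x) v) fresh (d + 1)
            (f₁ - (num :: fr').length) g₂ le_rfl ?_ ?_
          · simp only [List.length_cons] at h1 ⊢; omega
          · omega

theorem freshLeft_le (v : Std.HashSet Int) : freshLeft v ≤ 1000000 := by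
  unfold freshLeft
  calc ((Finset.Icc (1 : Int) 1000000).filter (fun x => ¬ v.contains x)).card
      ≤ (Finset.Icc (1 : Int) 1000000).card := Finset.card_filter_le _ _
    _ = 1000000 := by rw [Int.card_Icc]; rfl

-- ===== VERDICT (by name: the statement is the Claim_ definition above) =====
theorem bfs_spec : Claim_equal_bfs := by
  intro a b _
  unfold Spec_bfs bfs bfs_alt bfsFuel
  have hle := freshLeft_le (Std.HashSet.ofList [a])
  have hc1 : freshLeft (Std.HashSet.ofList [a]) + ([a] : List Int).length ≤ 2000000 := by
    simp only [List.length_cons, List.length_nil]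
    omega
  have := bfsLoop_sim b (freshLeft (Std.HashSet.ofList [a])) (Std.HashSet.ofList [a]) [a] 0
    2000000 2000000 le_rfl hc1 (by omega)
  exact this
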